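-- pv_equiv track=rewrite | github.com/sobir-git/Pentago | binboard.py | generate_all_diagonals
-- ===== SOURCE A (Python) =====
-- def generate_all_diagonals(size):
--     diagonals = []
--     directions = ( (0, 1), (1, 0), (1, -1), (1, 1) )
--     for di, dj in directions:
--         for si in range(6):
--             for sj in range(6):
--                 i, j = si, sj
--                 length = 0
--                 diagonal = []
--                 while 0 <= i < 6 and 0 <= j < 6:
--                     diagonal.append((i, j))
--                     i += di
--                     j += dj
--                     length += 1
--                     if length == size:
--                         break
--                 if length == size:
--                     diagonals.append(diagonal)
--     return diagonals
-- ===== SOURCE B (Python) =====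
-- def generate_all_diagonals(size):
--     if size < 1:
--         return []
--     lines = []
--     for di, dj in ((0, 1), (1, 0), (1, -1), (1, 1)):
--         for si in range(6):
--             for sj in range(6):
--                 ei, ej = si + (size - 1) * di, sj + (size - 1) * dj
--                 if 0 <= ei < 6 and 0 <= ej < 6:
--                     lines.append([(si + k * di, sj + k * dj) for k in range(size)])
--     return lines
-- ===== Notes on version B (the rewrite author's own statement) =====
-- stated objective: simpler
-- what changed: Replaces A's per-cell walk with early break (building each candidate line step by step and counting its length) by a single arithmetic endpoint-in-bounds test followed by direct construction of the line; an up-front guard for nonpositive sizes yields the empty list exactly as A does.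
import Mathlib
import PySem

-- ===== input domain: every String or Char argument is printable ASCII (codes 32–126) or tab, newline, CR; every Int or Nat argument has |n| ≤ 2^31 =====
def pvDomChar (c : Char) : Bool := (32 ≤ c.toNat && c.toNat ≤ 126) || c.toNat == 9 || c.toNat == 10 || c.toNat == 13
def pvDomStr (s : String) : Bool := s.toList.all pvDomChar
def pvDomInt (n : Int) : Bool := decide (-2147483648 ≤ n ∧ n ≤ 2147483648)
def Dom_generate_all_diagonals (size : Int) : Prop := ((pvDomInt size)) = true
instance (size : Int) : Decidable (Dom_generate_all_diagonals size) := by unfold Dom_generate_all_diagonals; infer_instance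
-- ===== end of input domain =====

-- B replaces A's step-by-step walk with early break by a direct endpoint-in-bounds
-- test plus direct construction of each line (simpler decomposition, same cost class).


-- ===== PORT A =====
-- A's 'while 0 <= i < 6 and 0 <= j < 6: ...' loop: fuel-guarded structural recursion.
-- Fuel 6 is exact: every direction has a component +1, so an in-bounds run takes at
-- most 6 iterations before the bound check fails.
def pvWalk (size di dj : Int) (fuel : Nat) (i j length : Int)
    (diagonal : List (Int × Int)) : List (Int × Int) × Int :=
  match fuel with
  | 0 => (diagonal, length)
  | fuel + 1 =>
    if 0 ≤ i ∧ i < 6 ∧ 0 ≤ j ∧ j < 6 then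
      let diagonal := diagonal ++ [(i, j)]
      let i := i + di
      let j := j + dj
      let length := length + 1
      if length = size then (diagonal, length)
      else pvWalk size di dj fuel i j length diagonal
    else (diagonal, length)

def generate_all_diagonals (size : Int) : List (List (Int × Int)) :=
  let directions : List (Int × Int) := [(0, 1), (1, 0), (1, -1), (1, 1)]
  directions.foldl (fun diagonals d =>
    (PySem.List.pyRange 0 6 1).foldl (fun diagonals si =>
      (PySem.List.pyRange 0 6 1).foldl (fun diagonals sj =>
        let r := pvWalk size d.1 d.2 6 si sj 0 []
        if r.2 = size then diagonals ++ [r.1] else diagonals) diagonals) diagonals) []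

-- ===== PORT B =====
def pvLine (si sj di dj size : Int) : List (Int × Int) :=
  (PySem.List.pyRange 0 size 1).map (fun k => (si + k * di, sj + k * dj))

def generate_all_diagonals_alt (size : Int) : List (List (Int × Int)) :=
  if size < 1 then []
  else
    ([(0, 1), (1, 0), (1, -1), (1, 1)] : List (Int × Int)).flatMap (fun d =>
      (PySem.List.pyRange 0 6 1).flatMap (fun si =>
        (PySem.List.pyRange 0 6 1).flatMap (fun sj =>
          if 0 ≤ si + (size - 1) * d.1 ∧ si + (size - 1) * d.1 < 6 ∧
             0 ≤ sj + (size - 1) * d.2 ∧ sj + (size - 1) * d.2 < 6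
          then [pvLine si sj d.1 d.2 size] else [])))

-- ===== PRECONDITION & SPEC =====
def Spec_generate_all_diagonals (size : Int) (out : List (List (Int × Int))) : Prop := out = generate_all_diagonals_alt size
instance (size : Int) (out : List (List (Int × Int))) : Decidable (Spec_generate_all_diagonals size out) := by unfold Spec_generate_all_diagonals; infer_instance

-- ===== CLAIM (what is proved, stated in full; the proofs are below) =====
def Claim_equal_generate_all_diagonals : Prop := ∀ (size : Int), Dom_generate_all_diagonals size → Spec_generate_all_diagonals size (generate_all_diagonals size)

-- ===== LEMMAS AND PROOFS =====

-- a fold whose step never changes the accumulator returns its initial value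
lemma pvFoldl_fixed {α β : Type} (l : List β) (f : α → β → α) (init : α)
    (h : ∀ acc, ∀ x ∈ l, f acc x = acc) : l.foldl f init = init := by
  induction l generalizing init with
  | nil => rfl
  | cons y t ih =>
    simp only [List.foldl_cons, h init y (by simp)]
    exact ih init (fun acc x hx => h acc x (by simp [hx]))

-- once the running length exceeds size, the walk can never end with length = size
lemma pvWalk_ne_of_lt (size di dj : Int) (fuel : Nat) :
    ∀ i j length diagonal, size < length →
      (pvWalk size di dj fuel i j length diagonal).2 ≠ size := by
  induction fuel with
  | zero => intro i j length diagonal h; simp [pvWalk]; omega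
  | succ n ih =>
    intro i j length diagonal h
    simp only [pvWalk]
    split_ifs with hb heq
    · omega
    · exact ih _ _ _ _ (by omega)
    · simpa using (by omega : length ≠ size)

-- each iteration adds one, so the final length is at most length + fuel
lemma pvWalk_le (size di dj : Int) (fuel : Nat) :
    ∀ i j length diagonal,
      (pvWalk size di dj fuel i j length diagonal).2 ≤ length + fuel := by
  induction fuel with
  | zero => intro i j length diagonal; simp [pvWalk]
  | succ n ih =>
    intro i j length diagonal
    simp only [pvWalk]
    split_ifs with hb heq
    · omega
    · have := ih (i + di) (j + dj) (length + 1) (diagonal ++ [(i, j)])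
      push_cast at this ⊢; omega
    · omega

-- from an in-bounds start with size outside 1..6, the walk never reports length = size
lemma pvWalk_start_ne (size di dj si sj : Int) (h : size ≤ 0 ∨ 7 ≤ size)
    (h1 : 0 ≤ si) (h2 : si < 6) (h3 : 0 ≤ sj) (h4 : sj < 6) :
    (pvWalk size di dj 6 si sj 0 []).2 ≠ size := by
  rcases h with h | h
  · show (pvWalk size di dj (5 + 1) si sj 0 []).2 ≠ size
    simp only [pvWalk]
    rw [if_pos ⟨h1, h2, h3, h4⟩, if_neg (by omega : ¬ (0 : Int) + 1 = size)]
    exact pvWalk_ne_of_lt size di dj 5 _ _ _ _ (by omega)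
  · have := pvWalk_le size di dj 6 si sj 0 []
    omega

lemma pvA_nil (size : Int) (h : size ≤ 0 ∨ 7 ≤ size) :
    generate_all_diagonals size = [] := by
  unfold generate_all_diagonals
  apply pvFoldl_fixed; intro acc d _
  apply pvFoldl_fixed; intro acc2 si hsi
  apply pvFoldl_fixed; intro acc3 sj hsj
  rw [PySem.List.mem_pyRange_one] at hsi hsj
  exact if_neg (pvWalk_start_ne size d.1 d.2 si sj h hsi.1 hsi.2 hsj.1 hsj.2)

lemma pvB_nil (size : Int) (h : 7 ≤ size) :
    generate_all_diagonals_alt size = [] := by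
  unfold generate_all_diagonals_alt
  rw [if_neg (by omega)]
  rw [List.flatMap_eq_nil_iff]
  intro d hd
  rw [List.flatMap_eq_nil_iff]
  intro si hsi
  rw [PySem.List.mem_pyRange_one] at hsi
  rw [List.flatMap_eq_nil_iff]
  intro sj hsj
  rw [PySem.List.mem_pyRange_one] at hsj
  fin_cases hd <;> · rw [if_neg]; simp only; omega

-- ===== VERDICT (by name: the statement is the Claim_ definition above) =====
set_option maxRecDepth 4000 in
theorem generate_all_diagonals_spec : Claim_equal_generate_all_diagonals := by
  intro size _
  unfold Spec_generate_all_diagonals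
  rcases (by omega : size < 1 ∨ 1 ≤ size) with h | h
  · rw [pvA_nil size (Or.inl (by omega))]
    unfold generate_all_diagonals_alt
    rw [if_pos h]
  · rcases (by omega : size ≤ 6 ∨ 7 ≤ size) with h6 | h6
    · interval_cases size <;> decide
    · rw [pvA_nil size (Or.inr h6), pvB_nil size h6]
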